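-- pv_equiv track=rewrite | github.com/wajid992/testing | src/utils.py | sort_by_search
-- ===== SOURCE A (Python) =====
-- def clean_word(word):
--     alpha = "abcdefghijklmnopqrstuvwxyz"
--     new = ""
--     for i in word.lower():
--         if i in alpha:
--             new += i
--     return new
--
-- def compare_word(word1, word2):
--     word1_subs = [
--         word1[i:j] for i in range(len(word1)) for j in range(i + 1, len(word1) + 1)
--     ]
--     word1_subs = sorted(word1_subs, key=lambda x: len(x), reverse=True)
--     word1_subs = [i for i in word1_subs if len(i) > 2]
--
--     score = 0
--     for i in word1_subs:
--         if i in word2: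
--             score += 1
--
--     return score
--
-- def sort_by_search(search, results):
--     cleaned_search = clean_word(search)
--
--     new_results = []
--     for result in results:
--         score = compare_word(cleaned_search, clean_word(result[1]))
--         new_results.append([result[0], score])
--     sorted_ids = [i[0] for i in sorted(new_results, key=lambda x: x[1], reverse=True)]
--
--     return sorted_ids
-- ===== SOURCE B (Python) =====
-- def clean_word(word):
--     alpha = "abcdefghijklmnopqrstuvwxyz"
--     new = ""
--     for i in word.lower():
--         if i in alpha:
--             new += i
--     return new
--
-- def sort_by_search(search, results):
--     cleaned = clean_word(search)
--     n = len(cleaned)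
--
--     scored = []
--     for result in results:
--         w2 = clean_word(result[1])
--         score = 0
--         for i in range(n):
--             # longest match starting at i; substring matches are prefix-closed,
--             # so the count of matching substrings of length > 2 starting at i
--             # is max(0, L - 2)
--             L = 0
--             while i + L < n and cleaned[i:i + L + 1] in w2:
--                 L += 1
--             if L > 2:
--                 score += L - 2
--         scored.append((result[0], score))
--
--     return [t[0] for t in sorted(scored, key=lambda t: t[1], reverse=True)]
-- ===== Notes on version B (the rewrite author's own statement) =====
-- stated objective: faster
-- what changed: Instead of materialising all O(n^2) substrings of the cleaned search word, sorting them and testing each against every result, B computes for each start position the longest match by incremental extension and adds max(0, L-2), using that substring matches are prefix-closed.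
import Mathlib
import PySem

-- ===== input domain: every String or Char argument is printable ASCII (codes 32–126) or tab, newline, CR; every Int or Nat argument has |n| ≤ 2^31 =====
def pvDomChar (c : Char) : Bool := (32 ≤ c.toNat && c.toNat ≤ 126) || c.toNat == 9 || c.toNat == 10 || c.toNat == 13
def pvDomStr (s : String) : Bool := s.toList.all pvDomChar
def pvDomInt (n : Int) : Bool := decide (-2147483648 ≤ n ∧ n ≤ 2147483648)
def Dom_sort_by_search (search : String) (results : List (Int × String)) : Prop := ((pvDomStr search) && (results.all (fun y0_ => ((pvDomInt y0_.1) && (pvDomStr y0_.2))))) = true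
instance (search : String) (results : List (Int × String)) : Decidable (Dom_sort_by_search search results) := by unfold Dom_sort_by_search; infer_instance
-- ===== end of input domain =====

-- B replaces A's enumeration-sort-and-test of all O(n^2) substrings by a per-start longest-match
-- extension (substring matches are prefix-closed), summing max(0, L-2); return value only.

-- ===== PORT A =====
-- shared module helper clean_word (identical in Source A and Source B); result string kept as List Char
def clean_word (word : String) : List Char :=
  (PySem.Chars.lower word.toList).foldl
    (fun new i => if PySem.Chars.isIn [i] "abcdefghijklmnopqrstuvwxyz".toList then new ++ [i] else new) []

def compare_word (word1 word2 : List Char) : Int :=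
  let word1_subs := (PySem.List.pyRange 0 (word1.length : Int)).flatMap
    (fun i => (PySem.List.pyRange (i + 1) ((word1.length : Int) + 1)).map
      (fun j => PySem.Chars.slice word1 (some i) (some j)))
  let word1_subs := PySem.List.sorted word1_subs (fun x => x.length) true
  let word1_subs := word1_subs.filter (fun s => decide (2 < (s.length : Int)))
  word1_subs.foldl (fun score i => if PySem.Chars.isIn i word2 then score + 1 else score) (0 : Int)

def sort_by_search (search : String) (results : List (Int × String)) : List Int :=
  let cleaned_search := clean_word search
  let new_results := results.foldl
    (fun acc result => acc ++ [(result.1, compare_word cleaned_search (clean_word result.2))]) []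
  (PySem.List.sorted new_results (fun x => x.2) true).map (fun i => i.1)

-- ===== PORT B =====
-- the `while i + L < n and cleaned[i:i+L+1] in w2: L += 1` loop of Source B
def matchLen (w1 w2 : List Char) (i L : Int) : Int :=
  if h : i + L < (w1.length : Int) ∧
      PySem.Chars.isIn (PySem.Chars.slice w1 (some i) (some (i + L + 1))) w2 then
    matchLen w1 w2 i (L + 1)
  else L
termination_by ((w1.length : Int) - (i + L)).toNat
decreasing_by omega

def sort_by_search_alt (search : String) (results : List (Int × String)) : List Int :=
  let cleaned := clean_word search
  let n : Int := cleaned.length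
  let scored := results.foldl (fun acc result =>
    let w2 := clean_word result.2
    let score := (PySem.List.pyRange 0 n).foldl (fun s i =>
      let L := matchLen cleaned w2 i 0
      if 2 < L then s + (L - 2) else s) (0 : Int)
    acc ++ [(result.1, score)]) []
  (PySem.List.sorted scored (fun t => t.2) true).map (fun t => t.1)

-- ===== PRECONDITION & SPEC =====
def Spec_sort_by_search (search : String) (results : List (Int × String)) (out : List Int) : Prop := out = sort_by_search_alt search results
instance (search : String) (results : List (Int × String)) (out : List Int) : Decidable (Spec_sort_by_search search results out) := by unfold Spec_sort_by_search; infer_instance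

-- ===== CLAIM (what is proved, stated in full; the proofs are below) =====
def Claim_equal_sort_by_search : Prop := ∀ (search : String) (results : List (Int × String)), Dom_sort_by_search search results → Spec_sort_by_search search results (sort_by_search search results)

-- ===== LEMMAS AND PROOFS =====

-- matchLen never shrinks its accumulator
theorem matchLen_ge (w1 w2 : List Char) (i L : Int) : L ≤ matchLen w1 w2 i L := by
  fun_induction matchLen w1 w2 i L <;> omega

-- matchLen stays within the word (stop when i + L reaches n)
theorem matchLen_le (w1 w2 : List Char) (i L : Int) (h : i + L ≤ (w1.length : Int)) :
    i + matchLen w1 w2 i L ≤ (w1.length : Int) := by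
  fun_induction matchLen w1 w2 i L with
  | case1 L hc ih => exact ih (by omega)
  | case2 L hc => omega

-- every length up to the result matched
theorem matchLen_good (w1 w2 : List Char) (i L t : Int) (ht : L < t)
    (htM : t ≤ matchLen w1 w2 i L) :
    PySem.Chars.isIn (PySem.Chars.slice w1 (some i) (some (i + t))) w2 = true := by
  revert t
  fun_induction matchLen w1 w2 i L with
  | case1 L hc ih =>
      intro t ht htM
      rcases eq_or_lt_of_le (show L + 1 ≤ t by omega) with heq | hlt
      · have hit : i + t = i + L + 1 := by omega
        rw [hit]; exact hc.2
      · exact ih t hlt htM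
  | case2 L hc =>
      intro t ht htM
      omega

-- the next extension fails (when there is room)
theorem matchLen_stop (w1 w2 : List Char) (i L : Int)
    (h : i + matchLen w1 w2 i L < (w1.length : Int)) :
    PySem.Chars.isIn (PySem.Chars.slice w1 (some i) (some (i + matchLen w1 w2 i L + 1))) w2 = false := by
  fun_induction matchLen w1 w2 i L with
  | case1 L hc ih => exact ih h
  | case2 L hc =>
      rw [Decidable.not_and_iff_not_or_not] at hc
      rcases hc with hc | hc
      · omega
      · simpa using hc

-- monotonicity: a shorter take from the same start is still an infix of w2
theorem isIn_take_mono (w2 s : List Char) (a b : Nat) (hab : a ≤ b)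
    (h : PySem.Chars.isIn (s.take b) w2 = true) :
    PySem.Chars.isIn (s.take a) w2 = true := by
  rw [PySem.Chars.isIn_iff_infix] at h ⊢
  have h1 : s.take a <+: s.take b := by
    rw [show s.take a = (s.take b).take a by rw [List.take_take, Nat.min_eq_left hab]]
    exact List.take_prefix _ _
  exact h1.isInfix.trans h

-- counting an integer interval inside pyRange a b
theorem countP_pyRange_interval (a b lo hi : Int) :
    ((List.countP (fun j => decide (lo ≤ j ∧ j ≤ hi)) (PySem.List.pyRange a b) : Nat) : Int)
      = max 0 (min hi (b - 1) - max lo a + 1) := by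
  by_cases hab : a ≤ b
  · obtain ⟨d, hd⟩ : ∃ d : Nat, b = a + d := ⟨(b - a).toNat, by omega⟩
    subst hd
    clear hab
    induction d with
    | zero =>
        rw [PySem.List.pyRange_one_eq_nil (by omega)]
        simp only [List.countP_nil, Nat.cast_zero]
        omega
    | succ m ih =>
        have hb : a + ((m + 1 : Nat) : Int) = (a + (m : Int)) + 1 := by push_cast; ring
        rw [hb, PySem.List.pyRange_one_succ_right (by omega), List.countP_append]
        simp only [List.countP_cons, List.countP_nil, Nat.cast_add]
        rw [ih]
        by_cases hq : lo ≤ a + m ∧ a + m ≤ hi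
        · rw [decide_eq_true hq]
          norm_num
          omega
        · rw [decide_eq_false hq]
          norm_num
          rcases Decidable.not_and_iff_not_or_not.mp hq with hq' | hq' <;> omega
  · rw [PySem.List.pyRange_one_eq_nil (by omega)]
    simp only [List.countP_nil, Nat.cast_zero]
    omega

-- the inner count of A, for one start position k, equals B's max(0, L-2) contribution
theorem inner_count (w1 w2 : List Char) (k : Nat) (hk : k < w1.length) :
    ((List.countP
        (fun s => PySem.Chars.isIn s w2 && decide (2 < (s.length : Int)))
        ((PySem.List.pyRange ((k : Int) + 1) ((w1.length : Int) + 1)).map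
          (fun j => PySem.Chars.slice w1 (some (k : Int)) (some j))) : Nat) : Int)
      = (if 2 < matchLen w1 w2 (k : Int) 0 then matchLen w1 w2 (k : Int) 0 - 2 else 0) := by
  have hM0 : (0:Int) ≤ matchLen w1 w2 (k : Int) 0 := matchLen_ge w1 w2 (k : Int) 0
  have hMn : (k : Int) + matchLen w1 w2 (k : Int) 0 ≤ (w1.length : Int) := by
    have := matchLen_le w1 w2 (k : Int) 0 (by omega)
    omega
  rw [List.countP_map,
    List.countP_congr (q := fun j => decide ((k:Int) + 3 ≤ j ∧ j ≤ (k:Int) + matchLen w1 w2 (k : Int) 0)) ?_,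
    countP_pyRange_interval]
  · omega
  · intro j hj
    rw [PySem.List.mem_pyRange_one] at hj
    have hjn : j = ((j.toNat : Nat) : Int) := by omega
    rw [hjn] at hj ⊢
    set jn := j.toNat with hjdef
    have hk1 : k + 1 ≤ jn := by omega
    have hjle : jn ≤ w1.length := by omega
    simp only [Function.comp_apply, PySem.Chars.slice_eq_listSlice, PySem.List.slice_natCast]
    rw [Bool.and_eq_true, decide_eq_true_eq, decide_eq_true_eq]
    have hlen : ((w1.drop k).take (jn - k)).length = jn - k := by
      rw [List.length_take, List.length_drop]; omega
    constructor
    · rintro ⟨hin, hlen2⟩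
      rw [hlen] at hlen2
      refine ⟨by omega, ?_⟩
      by_contra hgt
      push Not at hgt
      have hroom : (k : Int) + matchLen w1 w2 (k : Int) 0 < (w1.length : Int) := by omega
      have hstop := matchLen_stop w1 w2 (k : Int) 0 hroom
      have hcast : (k : Int) + matchLen w1 w2 (k : Int) 0 + 1
          = ((k + (matchLen w1 w2 (k : Int) 0).toNat + 1 : Nat) : Int) := by push_cast; omega
      rw [hcast, PySem.Chars.slice_eq_listSlice, PySem.List.slice_natCast] at hstop
      have htk : k + (matchLen w1 w2 (k : Int) 0).toNat + 1 - k
          = (matchLen w1 w2 (k : Int) 0).toNat + 1 := by omega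
      rw [htk] at hstop
      have := isIn_take_mono w2 (w1.drop k) ((matchLen w1 w2 (k : Int) 0).toNat + 1) (jn - k)
        (by omega) hin
      rw [this] at hstop
      exact Bool.true_eq_false.mp hstop
    · rintro ⟨h3, hle⟩
      have hgood := matchLen_good w1 w2 (k : Int) 0 ((jn : Int) - (k : Int)) (by omega) (by omega)
      have hcast : (k : Int) + ((jn : Int) - (k : Int)) = ((jn : Nat) : Int) := by omega
      rw [hcast, PySem.Chars.slice_eq_listSlice, PySem.List.slice_natCast] at hgood
      exact ⟨hgood, by rw [hlen]; omega⟩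

-- per-word score equality: A's compare_word equals B's per-result scoring loop
theorem score_eq (w1 w2 : List Char) :
    compare_word w1 w2 = (PySem.List.pyRange 0 (w1.length : Int)).foldl (fun s i =>
      let L := matchLen w1 w2 i 0
      if 2 < L then s + (L - 2) else s) (0 : Int) := by
  unfold compare_word
  rw [PySem.List.foldl_count_if, List.countP_filter,
    (PySem.List.sorted_perm _ _ _).countP_eq, List.countP_flatMap]
  have hbody : (fun (s : Int) (i : Int) =>
        let L := matchLen w1 w2 i 0
        if 2 < L then s + (L - 2) else s)
      = fun s i => s + (if 2 < matchLen w1 w2 i 0 then matchLen w1 w2 i 0 - 2 else 0) := by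
    funext s i
    dsimp only
    split_ifs <;> omega
  rw [hbody, PySem.List.foldl_add, PySem.List.pyRange_zero_natCast, List.map_map, List.map_map,
    Nat.cast_list_sum, List.map_map]
  congr 1
  refine congrArg List.sum (List.map_congr_left ?_)
  intro k hk
  rw [List.mem_range] at hk
  simpa using inner_count w1 w2 k hk

-- ===== VERDICT (by name: the statement is the Claim_ definition above) =====
theorem sort_by_search_spec : Claim_equal_sort_by_search := by
  intro search results _
  unfold Spec_sort_by_search sort_by_search sort_by_search_alt
  simp only [score_eq]
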